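-- pv_equiv track=rewrite | github.com/Wimull/Turing-USP-Techinical-Case | 1_logica/q2b.py | estado_atual
-- ===== SOURCE A (Python) =====
-- def estado_atual(TAMANHO, horarios, INSTANTE):
--     class Carro:                                  #Defines a class (cars) with an id, moment of entry and position in the parking lot
--         def __init__(self, entrada, id):
--             self.entrada = entrada
--             self.id = id
--             self.lugar_no_estacionamento = 0
--
--         def position(self, momento):
--             self.lugar_no_estacionamento = momento - self.entrada #Uptades the position of the car based on the rule that the car moves one position in the parking lot each instant
--             if (self.lugar_no_estacionamento < TAMANHO) & (self.lugar_no_estacionamento > -1): return self.lugar_no_estacionamento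
--             return -1                             #Calculates the position of the car based on the instant given or, if the car has moved out of the parking lot or hasn't arrieved yet, returns -1
--
--
--     estacionamento = []                           #Defines a parking lot as an array of length "TAMANHO" filled with 0's
--     for x in range(0, TAMANHO):
--         estacionamento.append(0)
--
--     for i in range(1, len(horarios) + 1):
--         i = Carro(horarios[i - 1], i)
--         if i.position(INSTANTE) > -1:
--             estacionamento[i.position(INSTANTE)] = i.id
--     return estacionamento                         #Returns an array with the id of the car in that position, or zero if that position is empty
-- ===== SOURCE B (Python) =====
-- def estado_atual(TAMANHO, horarios, INSTANTE):
--     table = {}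
--     for i, h in enumerate(horarios, 1):
--         table[h] = i
--     return [table.get(INSTANTE - p, 0) for p in range(TAMANHO)]
-- ===== Notes on version B (the rewrite author's own statement) =====
-- stated objective: simpler
-- what changed: Drops the Carro class and the place-each-car loop: B builds one dict from entry time to car id (later cars overwrite earlier ones) and then fills the result by traversing output positions and looking up the occupant of each slot.
import Mathlib
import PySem

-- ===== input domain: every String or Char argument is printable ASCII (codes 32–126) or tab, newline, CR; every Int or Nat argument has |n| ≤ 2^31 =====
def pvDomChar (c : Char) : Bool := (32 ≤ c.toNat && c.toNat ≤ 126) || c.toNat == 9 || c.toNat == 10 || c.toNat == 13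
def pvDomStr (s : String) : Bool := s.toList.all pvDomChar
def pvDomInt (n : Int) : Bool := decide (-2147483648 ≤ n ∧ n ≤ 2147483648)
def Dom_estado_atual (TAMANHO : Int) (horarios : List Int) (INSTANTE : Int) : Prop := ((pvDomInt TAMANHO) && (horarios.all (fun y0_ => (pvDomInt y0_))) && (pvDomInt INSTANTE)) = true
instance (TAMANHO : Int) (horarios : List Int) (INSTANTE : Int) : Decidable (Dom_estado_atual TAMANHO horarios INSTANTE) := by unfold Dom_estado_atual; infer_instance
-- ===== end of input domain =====

-- B drops the Carro class: it builds a dict from entry time to car id, then fills the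
-- result by traversing output positions and looking up each slot's occupant (objective: simpler).

-- ===== PORT A =====
-- Carro.position(momento): the only method behaviour the loop uses, closed over TAMANHO.
def pvCarroPosition (TAMANHO : Int) (entrada : Int) (momento : Int) : Int :=
  let lugar := momento - entrada
  if lugar < TAMANHO ∧ lugar > -1 then lugar else -1

def estado_atual (TAMANHO : Int) (horarios : List Int) (INSTANTE : Int) : List Int :=
  let estacionamento : List Int :=
    (PySem.List.pyRange 0 TAMANHO 1).foldl (fun est _ => est ++ [0]) []
  (PySem.List.pyRange 1 ((horarios.length : Int) + 1) 1).foldl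
    (fun est i =>
      let entrada := PySem.List.pyGetD horarios (i - 1) 0   -- i-1 always in range
      if pvCarroPosition TAMANHO entrada INSTANTE > -1 then
        PySem.List.pySetD est (pvCarroPosition TAMANHO entrada INSTANTE) i   -- index always in range
      else est)
    estacionamento

-- ===== PORT B =====
def estado_atual_alt (TAMANHO : Int) (horarios : List Int) (INSTANTE : Int) : List Int :=
  let table : PySem.Dict Int Int :=
    (PySem.List.enumerate horarios 1).foldl (fun d p => d.insert p.2 p.1) PySem.Dict.empty
  (PySem.List.pyRange 0 TAMANHO 1).map (fun p => table.getD (INSTANTE - p) 0)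

-- ===== PRECONDITION & SPEC =====
def Spec_estado_atual (TAMANHO : Int) (horarios : List Int) (INSTANTE : Int) (out : List Int) : Prop := out = estado_atual_alt TAMANHO horarios INSTANTE
instance (TAMANHO : Int) (horarios : List Int) (INSTANTE : Int) (out : List Int) : Decidable (Spec_estado_atual TAMANHO horarios INSTANTE out) := by unfold Spec_estado_atual; infer_instance

-- ===== CLAIM (what is proved, stated in full; the proofs are below) =====
def Claim_equal_estado_atual : Prop := ∀ (TAMANHO : Int) (horarios : List Int) (INSTANTE : Int), Dom_estado_atual TAMANHO horarios INSTANTE → Spec_estado_atual TAMANHO horarios INSTANTE (estado_atual TAMANHO horarios INSTANTE)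

-- ===== LEMMAS AND PROOFS =====

-- the zeros-building loop yields a replicate
theorem pv_zeros_eq (l : List Int) (init : List Int) :
    l.foldl (fun est _ => est ++ [(0 : Int)]) init = init ++ List.replicate l.length 0 := by
  induction l generalizing init with
  | nil => simp
  | cons x xs ih =>
      rw [List.foldl_cons, ih]
      simp only [List.length_cons, List.append_assoc, List.singleton_append]
      rw [← List.replicate_succ, List.replicate_succ']

-- A's loop step, with pvCarroPosition unfolded
theorem pv_step_eq (T I e i : Int) (est : List Int) :
    (if pvCarroPosition T e I > -1 then PySem.List.pySetD est (pvCarroPosition T e I) i else est)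
      = if I - e < T ∧ I - e > -1 then PySem.List.pySetD est (I - e) i else est := by
  simp only [pvCarroPosition]
  split_ifs with h1 h2 h2 <;> try rfl
  · exact absurd h1.2 (by omega)
  · omega

def pvTable (hs : List Int) : PySem.Dict Int Int :=
  (PySem.List.enumerate hs 1).foldl (fun d p => d.insert p.2 p.1) PySem.Dict.empty

theorem pv_table_append (hs : List Int) (x : Int) :
    pvTable (hs ++ [x]) = (pvTable hs).insert x ((hs.length : Int) + 1) := by
  unfold pvTable
  rw [PySem.List.enumerate_append, List.foldl_append]
  simp [PySem.List.enumerate, add_comm]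

-- updating one slot of the position-indexed map
theorem pv_map_insert (T I x v : Int) (d : PySem.Dict Int Int) :
    (PySem.List.pyRange 0 T 1).map (fun p => (d.insert x v).getD (I - p) 0)
      = if I - x < T ∧ I - x > -1 then
          PySem.List.pySetD ((PySem.List.pyRange 0 T 1).map (fun p => d.getD (I - p) 0)) (I - x) v
        else (PySem.List.pyRange 0 T 1).map (fun p => d.getD (I - p) 0) := by
  split_ifs with h
  · obtain ⟨hlt, hgt⟩ := h
    rw [PySem.List.pySetD_of_nonneg _ _ (show (0:Int) ≤ I - x by omega)]
    apply List.ext_getElem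
    · simp
    · intro k hk1 hk2
      rw [List.getElem_map, PySem.List.getElem_pyRange_one, List.getElem_set]
      rw [PySem.Dict.getD_insert]
      by_cases hx : (I - x).toNat = k
      · rw [if_pos hx, if_pos (show I - (0 + (k : Int)) = x by omega)]
      · rw [if_neg hx, if_neg (show ¬ I - (0 + (k : Int)) = x by omega), List.getElem_map,
            PySem.List.getElem_pyRange_one]
  · apply List.map_congr_left
    intro p hp
    rw [PySem.List.mem_pyRange_one] at hp
    rw [PySem.Dict.getD_insert]
    have : ¬ (I - p = x) := by omega
    simp [this]

theorem pv_core (T I : Int) (hs : List Int) :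
    (PySem.List.pyRange 1 ((hs.length : Int) + 1) 1).foldl
      (fun est i =>
        if pvCarroPosition T (PySem.List.pyGetD hs (i - 1) 0) I > -1 then
          PySem.List.pySetD est (pvCarroPosition T (PySem.List.pyGetD hs (i - 1) 0) I) i
        else est)
      (List.replicate (T - 0).toNat 0)
      = (PySem.List.pyRange 0 T 1).map (fun p => (pvTable hs).getD (I - p) 0) := by
  induction hs using List.reverseRecOn with
  | nil =>
      rw [show ((List.length ([] : List Int) : Int) + 1) = 1 by simp,
          PySem.List.pyRange_one_eq_nil (le_refl 1), List.foldl_nil]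
      simp [pvTable, PySem.List.enumerate, PySem.Dict.getD_empty, List.map_const',
            PySem.List.length_pyRange_one]
  | append_singleton hs x ih =>
      have hn : (1 : Int) ≤ (hs.length : Int) + 1 := by omega
      rw [List.length_append, List.length_singleton]
      rw [show (((hs.length + 1 : Nat) : Int) + 1) = ((hs.length : Int) + 1) + 1 by push_cast; ring]
      rw [PySem.List.pyRange_one_succ_right hn, List.foldl_append, List.foldl_cons, List.foldl_nil]
      have hcong := PySem.List.foldl_congr_mem (PySem.List.pyRange 1 ((hs.length : Int) + 1) 1)
          (fun est i =>
            if pvCarroPosition T (PySem.List.pyGetD (hs ++ [x]) (i - 1) 0) I > -1 then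
              PySem.List.pySetD est (pvCarroPosition T (PySem.List.pyGetD (hs ++ [x]) (i - 1) 0) I) i
            else est)
          (fun est i =>
            if pvCarroPosition T (PySem.List.pyGetD hs (i - 1) 0) I > -1 then
              PySem.List.pySetD est (pvCarroPosition T (PySem.List.pyGetD hs (i - 1) 0) I) i
            else est)
          (List.replicate (T - 0).toNat 0)
          (by
            intro acc i hi
            rw [PySem.List.mem_pyRange_one] at hi
            have h0 : (0:Int) ≤ i - 1 := by omega
            have h1 : i - 1 < (hs.length : Int) := by omega
            have hg : PySem.List.pyGetD (hs ++ [x]) (i - 1) 0 = PySem.List.pyGetD hs (i - 1) 0 := by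
              rw [PySem.List.pyGetD_eq_getElem _ _ h0 (by simp; omega),
                  PySem.List.pyGetD_eq_getElem _ _ h0 (by simpa using h1)]
              exact List.getElem_append_left (by omega)
            dsimp only
            rw [hg])
      rw [hcong]
      rw [ih]
      have hget : PySem.List.pyGetD (hs ++ [x]) ((hs.length : Int) + 1 - 1) 0 = x := by
        rw [PySem.List.pyGetD_eq_getElem _ _ (by omega) (by simp)]
        simp
      rw [hget, pv_step_eq, pv_table_append, pv_map_insert]

theorem pv_main (TAMANHO horarios INSTANTE) :
    estado_atual TAMANHO horarios INSTANTE = estado_atual_alt TAMANHO horarios INSTANTE := by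
  simp only [estado_atual, estado_atual_alt]
  rw [pv_zeros_eq, List.nil_append, PySem.List.length_pyRange_one]
  exact pv_core TAMANHO INSTANTE horarios

-- ===== VERDICT (by name: the statement is the Claim_ definition above) =====
theorem estado_atual_spec : Claim_equal_estado_atual := by
  intro T hs I _
  exact pv_main T hs I
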